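-- pv_equiv track=rewrite | github.com/codebyshennan/survey-summarizer | app/helpers/text.py | concatenate_text
-- ===== SOURCE A (Python) =====
-- def concatenate_text(labels, text):
--
--     clusters = {}
--
--     for label, sentence in zip(labels, text):
--         if label not in clusters:
--             clusters[label] = []
--         clusters[label].append(sentence)
--
--     concatenated_text = {}
--
--     for label in clusters:
--         concatenated_text[label] = ' '.join(clusters[label])
--     return concatenated_text
-- ===== SOURCE B (Python) =====
-- def concatenate_text(labels, text):
--     result = {}
--     for label, sentence in zip(labels, text):
--         if label in result:
--             result[label] = result[label] + " " + sentence
--         else: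
--             result[label] = sentence
--     return result
-- ===== Notes on version B (the rewrite author's own statement) =====
-- stated objective: simpler
-- what changed: B accumulates each label's joined string directly in one pass over zip(labels, text), eliminating A's intermediate dict of sentence lists and its whole second join loop.
import Mathlib
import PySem

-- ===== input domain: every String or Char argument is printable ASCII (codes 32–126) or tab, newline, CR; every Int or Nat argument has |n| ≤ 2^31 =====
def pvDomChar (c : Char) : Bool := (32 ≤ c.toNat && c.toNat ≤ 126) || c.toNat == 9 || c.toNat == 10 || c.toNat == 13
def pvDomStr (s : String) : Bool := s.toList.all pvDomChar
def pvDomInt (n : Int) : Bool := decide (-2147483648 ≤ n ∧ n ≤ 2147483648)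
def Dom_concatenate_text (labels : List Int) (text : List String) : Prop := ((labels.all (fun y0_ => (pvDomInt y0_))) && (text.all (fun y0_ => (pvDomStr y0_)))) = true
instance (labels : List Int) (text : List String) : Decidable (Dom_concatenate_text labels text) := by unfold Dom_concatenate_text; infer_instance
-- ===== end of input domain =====

-- B builds each label's joined string directly in one pass, dropping A's list-of-sentences
-- intermediate and its second join loop (objective: simpler).

-- ===== PORT A =====
-- A: group sentences into lists per label, then a second loop joins each list with ' '.
-- (Python's clusters[label].append(sentence) mutates the list in place; ported as
-- re-inserting the extended list, which yields the same dict.)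
def concatenate_text (labels : List Int) (text : List String) : List (Int × String) :=
  let clusters : PySem.Dict Int (List String) :=
    (List.zip labels text).foldl
      (fun d p =>
        let d1 := if d.contains p.1 then d else d.insert p.1 ([] : List String)
        d1.insert p.1 (d1.getD p.1 [] ++ [p.2]))
      PySem.Dict.empty
  let concatenated : PySem.Dict Int String :=
    clusters.keys.foldl
      (fun d k => d.insert k (PySem.Str.join " " (clusters.getD k [])))
      PySem.Dict.empty
  concatenated.items

-- ===== PORT B =====
def concatenate_text_alt (labels : List Int) (text : List String) : List (Int × String) :=
  ((List.zip labels text).foldl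
    (fun d p =>
      match d.get? p.1 with
      | some acc => d.insert p.1 (acc ++ " " ++ p.2)
      | none => d.insert p.1 p.2)
    (PySem.Dict.empty : PySem.Dict Int String)).items

-- ===== PRECONDITION & SPEC =====
def Spec_concatenate_text (labels : List Int) (text : List String) (out : List (Int × String)) : Prop := out = concatenate_text_alt labels text
instance (labels : List Int) (text : List String) (out : List (Int × String)) : Decidable (Spec_concatenate_text labels text out) := by unfold Spec_concatenate_text; infer_instance

-- ===== CLAIM (what is proved, stated in full; the proofs are below) =====
def Claim_equal_concatenate_text : Prop := ∀ (labels : List Int) (text : List String), Dom_concatenate_text labels text → Spec_concatenate_text labels text (concatenate_text labels text)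

-- ===== LEMMAS AND PROOFS =====

-- value-mapped dict lookup
theorem get?_mapVal {nu mu : Type} (g : nu → mu) (l : List (Int × nu)) (k : Int) :
    (PySem.Dict.mk (l.map (fun p => (p.1, g p.2))) : PySem.Dict Int mu).get? k
      = ((PySem.Dict.mk l : PySem.Dict Int nu).get? k).map g := by
  induction l with
  | nil => rfl
  | cons a rest ih =>
    obtain ⟨a1, a2⟩ := a
    simp only [List.map_cons, PySem.Dict.get?_mk_cons]
    split_ifs with h
    · rfl
    · exact ih

theorem chars_join_append (sep x : List Char) (ps : List (List Char)) (h : ps ≠ []) :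
    PySem.Chars.join sep (ps ++ [x]) = PySem.Chars.join sep ps ++ sep ++ x := by
  induction ps with
  | nil => exact absurd rfl h
  | cons a rest ih =>
    cases rest with
    | nil =>
      simp only [List.cons_append, List.nil_append, PySem.Chars.join_cons_cons,
        PySem.Chars.join_singleton]
    | cons b r =>
      have ih2 := ih (by simp)
      simp only [List.cons_append] at ih2 ⊢
      rw [PySem.Chars.join_cons_cons, ih2, PySem.Chars.join_cons_cons]
      simp [List.append_assoc]

theorem join_append_singleton (sep : String) (vs : List String) (s : String) (h : vs ≠ []) :
    PySem.Str.join sep (vs ++ [s]) = PySem.Str.join sep vs ++ sep ++ s := by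
  rw [← String.toList_inj]
  simp only [String.toList_append, PySem.Str.toList_join, List.map_append, List.map_cons,
    List.map_nil]
  exact chars_join_append sep.toList s.toList (vs.map String.toList) (by simpa using h)

theorem str_join_singleton (sep s : String) : PySem.Str.join sep [s] = s := by
  rw [← String.toList_inj, PySem.Str.toList_join, List.map_cons, List.map_nil,
    PySem.Chars.join_singleton]

def stepA (d : PySem.Dict Int (List String)) (p : Int × String) : PySem.Dict Int (List String) :=
  let d1 := if d.contains p.1 then d else d.insert p.1 ([] : List String)
  d1.insert p.1 (d1.getD p.1 [] ++ [p.2])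

def stepB (d : PySem.Dict Int String) (p : Int × String) : PySem.Dict Int String :=
  match d.get? p.1 with
  | some acc => d.insert p.1 (acc ++ " " ++ p.2)
  | none => d.insert p.1 p.2

def mapJoin (l : List (Int × List String)) : List (Int × String) :=
  l.map (fun p => (p.1, PySem.Str.join " " p.2))

-- the single-step simulation: B's dict is A's clusters dict with every value joined
theorem step_sim (C : PySem.Dict Int (List String)) (p : Int × String)
    (hne : ∀ q ∈ C.items, q.2 ≠ ([] : List String)) :
    stepB (PySem.Dict.mk (mapJoin C.items)) p = PySem.Dict.mk (mapJoin (stepA C p).items) := by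
  unfold stepA stepB mapJoin
  rcases hc : C.get? p.1 with _ | vs
  · have hcont : C.contains p.1 = false := by
      rw [PySem.Dict.contains_eq_isSome_get?, hc]; rfl
    rw [show (PySem.Dict.mk (C.items.map (fun p => (p.1, PySem.Str.join " " p.2)))).get? p.1
        = ((PySem.Dict.mk C.items : PySem.Dict Int (List String)).get? p.1).map
            (PySem.Str.join " ") from get?_mapVal _ _ _]
    have hCmk : (PySem.Dict.mk C.items : PySem.Dict Int (List String)) = C := rfl
    rw [hCmk, hc]
    simp only [Option.map_none, hcont, Bool.false_eq_true, if_false]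
    have hitems : ((C.insert p.1 ([] : List String)).insert p.1
        ((C.insert p.1 ([] : List String)).getD p.1 [] ++ [p.2])).items
        = C.items ++ [(p.1, [p.2])] := by
      rw [PySem.Dict.insert_insert_self, PySem.Dict.getD_insert_self,
        PySem.Dict.items_insert_of_not_contains _ _ hcont]
      rfl
    have hBcont : (PySem.Dict.mk (C.items.map (fun p => (p.1, PySem.Str.join " " p.2)))).contains p.1 = false := by
      rw [PySem.Dict.contains_eq_isSome_get?, get?_mapVal, hCmk, hc]; rfl
    apply PySem.Dict.ext
    rw [PySem.Dict.items_insert_of_not_contains _ _ hBcont, hitems]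
    simp [str_join_singleton]
  · have hcont : C.contains p.1 = true := by
      rw [PySem.Dict.contains_eq_isSome_get?, hc]; rfl
    have hvs : vs ≠ [] := hne _ (PySem.Dict.mem_items_of_get?_eq_some C hc)
    have hCmk : (PySem.Dict.mk C.items : PySem.Dict Int (List String)) = C := rfl
    rw [show (PySem.Dict.mk (C.items.map (fun p => (p.1, PySem.Str.join " " p.2)))).get? p.1
        = ((PySem.Dict.mk C.items : PySem.Dict Int (List String)).get? p.1).map
            (PySem.Str.join " ") from get?_mapVal _ _ _]
    rw [hCmk, hc]
    simp only [Option.map_some, hcont, if_true]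
    have hgetD : C.getD p.1 [] = vs := by rw [PySem.Dict.getD_eq_get?_getD, hc]; rfl
    have hBcont : (PySem.Dict.mk (C.items.map (fun p => (p.1, PySem.Str.join " " p.2)))).contains p.1 = true := by
      rw [PySem.Dict.contains_eq_isSome_get?, get?_mapVal, hCmk, hc]; rfl
    apply PySem.Dict.ext
    rw [PySem.Dict.items_insert_of_contains _ _ hBcont,
      PySem.Dict.items_insert_of_contains _ _ hcont, hgetD]
    simp only [List.map_map]
    apply List.map_congr_left
    intro q _
    by_cases hq : (q.1 == p.1) = true <;>
      simp [Function.comp, hq, join_append_singleton " " vs p.2 hvs]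

-- the loop simulation
theorem fold_sim (l : List (Int × String)) (C : PySem.Dict Int (List String))
    (hne : ∀ q ∈ C.items, q.2 ≠ ([] : List String)) :
    l.foldl stepB (PySem.Dict.mk (mapJoin C.items)) = PySem.Dict.mk (mapJoin (l.foldl stepA C).items) := by
  induction l generalizing C with
  | nil => rfl
  | cons p rest ih =>
    have hne2 : ∀ q ∈ (stepA C p).items, q.2 ≠ ([] : List String) := by
      intro q hq
      unfold stepA at hq
      by_cases hc : C.contains p.1 = true
      · simp only [hc, if_true] at hq
        rw [PySem.Dict.items_insert_of_contains _ _ hc] at hq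
        rcases List.mem_map.mp hq with ⟨r, hr, hrq⟩
        by_cases h1 : (r.1 == p.1) = true
        · simp only [h1, if_true] at hrq
          rw [← hrq]; simp
        · simp only [h1, Bool.false_eq_true, if_false] at hrq
          rw [← hrq]; exact hne r hr
      · have hc2 : C.contains p.1 = false := by simpa using hc
        simp only [hc2, Bool.false_eq_true, if_false] at hq
        rw [PySem.Dict.insert_insert_self, PySem.Dict.getD_insert_self,
          PySem.Dict.items_insert_of_not_contains _ _ hc2] at hq
        rcases List.mem_append.mp hq with hmem | hmem
        · exact hne q hmem
        · simp only [List.mem_singleton] at hmem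
          rw [hmem]; simp
    rw [List.foldl_cons, List.foldl_cons, step_sim C p hne, ih _ hne2]

theorem keys_nodup_A (l : List (Int × String)) (C : PySem.Dict Int (List String))
    (h : C.keys.Nodup) : (l.foldl stepA C).keys.Nodup := by
  induction l generalizing C with
  | nil => exact h
  | cons p rest ih =>
    apply ih
    unfold stepA
    split_ifs with hc
    · exact PySem.Dict.nodup_keys_insert _ _ _ h
    · exact PySem.Dict.nodup_keys_insert _ _ _ (PySem.Dict.nodup_keys_insert _ _ _ h)

-- ===== VERDICT (by name: the statement is the Claim_ definition above) =====
theorem concatenate_text_spec : Claim_equal_concatenate_text := by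
  intro labels text _
  unfold Spec_concatenate_text concatenate_text concatenate_text_alt
  set l := List.zip labels text with hl
  set C := l.foldl stepA PySem.Dict.empty with hC
  have hfoldA : (l.foldl
      (fun d p =>
        let d1 := if d.contains p.1 then d else d.insert p.1 ([] : List String)
        d1.insert p.1 (d1.getD p.1 [] ++ [p.2]))
      PySem.Dict.empty) = C := rfl
  have hfoldB : (l.foldl
      (fun (d : PySem.Dict Int String) p =>
        match d.get? p.1 with
        | some acc => d.insert p.1 (acc ++ " " ++ p.2)
        | none => d.insert p.1 p.2)
      PySem.Dict.empty) = PySem.Dict.mk (mapJoin C.items) := by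
    have := fold_sim l PySem.Dict.empty (by intro q hq; simp [PySem.Dict.empty] at hq)
    rw [hC]
    exact this
  have hnd : C.keys.Nodup := keys_nodup_A l PySem.Dict.empty PySem.Dict.nodup_keys_empty
  simp only [hfoldA, hfoldB]
  rw [PySem.Dict.items_foldl_insert_fresh C.keys (fun k => k)
      (fun k => PySem.Str.join " " (C.getD k []))
      PySem.Dict.empty (by intro a _; rfl) (by simpa using hnd)]
  have hit : C.items = C.keys.map (fun k => (k, C.getD k [])) :=
    PySem.Dict.items_eq_map_keys C hnd []
  simp [mapJoin, hit, List.map_map, Function.comp, PySem.Dict.empty]
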